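-- pv_equiv track=rewrite | github.com/MoOo2mini/SSUalgo | 이민희/implement/boj16236_dfs.py | getMovWay
-- ===== SOURCE A (Python) =====
-- def getMovWay(second) :
--     mov_way = set()
--     for i in range(second + 1) :
--         mov_way.add(tuple([i, second - i]))
--         mov_way.add(tuple([i, (second - i) * -1]))
--         mov_way.add(tuple([i * -1, (second - i) * -1]))
--         mov_way.add(tuple([i * -1, second - i]))
--     mov_way = sorted(mov_way, key=lambda x : (x[0], x[1]))
--     return mov_way
-- ===== SOURCE B (Python) =====
-- def getMovWay(second):
--     mov_way = []
--     for x in range(-second, second + 1):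
--         r = second - abs(x)
--         if r > 0:
--             mov_way.append((x, -r))
--             mov_way.append((x, r))
--         else:
--             mov_way.append((x, 0))
--     return mov_way
-- ===== Notes on version B (the rewrite author's own statement) =====
-- stated objective: faster
-- what changed: B emits the offsets directly in sorted order with one pass over x = -second..second (each x contributes [x, -(second-|x|)] and [x, second-|x|]), eliminating A's set construction and comparison sort.
import Mathlib
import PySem

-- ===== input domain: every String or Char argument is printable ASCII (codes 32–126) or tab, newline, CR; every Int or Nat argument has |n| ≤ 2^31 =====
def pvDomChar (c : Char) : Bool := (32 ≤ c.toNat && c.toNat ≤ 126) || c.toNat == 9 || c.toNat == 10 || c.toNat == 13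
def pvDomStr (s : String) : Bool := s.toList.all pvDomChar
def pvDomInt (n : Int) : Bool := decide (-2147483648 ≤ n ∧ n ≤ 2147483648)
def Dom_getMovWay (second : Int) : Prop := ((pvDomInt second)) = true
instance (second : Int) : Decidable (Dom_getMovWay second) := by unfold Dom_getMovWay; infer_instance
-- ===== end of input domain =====

-- B generates the offsets directly in sorted order (one pass over x = -second..second),
-- avoiding A's set construction and O(n log n) sort; same return value everywhere.

-- ===== PORT A =====
def getMovWay (second : Int) : List (List Int) :=
  let movWay : PySem.Set (List Int) :=
    (PySem.List.pyRange 0 (second + 1)).foldl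
      (fun s i =>
        ((((s.add [i, second - i]).add
            [i, (second - i) * -1]).add
            [i * -1, (second - i) * -1]).add
            [i * -1, second - i]))
      PySem.Set.empty
  PySem.List.sorted2 movWay (fun x => PySem.List.pyGetD x 0 0) (fun x => PySem.List.pyGetD x 1 0)

-- ===== PORT B =====
def getMovWay_alt (second : Int) : List (List Int) :=
  (PySem.List.pyRange (-second) (second + 1)).foldl
    (fun acc x =>
      let r := second - |x|
      if r > 0 then acc ++ [[x, -r]] ++ [[x, r]] else acc ++ [[x, 0]])
    []

-- ===== PRECONDITION & SPEC =====
def Spec_getMovWay (second : Int) (out : List (List Int)) : Prop := out = getMovWay_alt second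
instance (second : Int) (out : List (List Int)) : Decidable (Spec_getMovWay second out) := by unfold Spec_getMovWay; infer_instance

-- ===== CLAIM (what is proved, stated in full; the proofs are below) =====
def Claim_equal_getMovWay : Prop := ∀ (second : Int), Dom_getMovWay second → Spec_getMovWay second (getMovWay second)

-- ===== LEMMAS AND PROOFS =====

-- the boolean "before" comparator that PySem.List.sorted2 uses for key (k1, k2)
def pvLtB {α : Type} (k1 k2 : α → Int) (a b : α) : Bool :=
  decide (k1 a < k1 b) || (!decide (k1 b < k1 a) && decide (k2 a < k2 b))

-- non-strict lexicographic order on the two keys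
def pvLe {α : Type} (k1 k2 : α → Int) (a b : α) : Prop :=
  k1 a < k1 b ∨ (k1 a = k1 b ∧ k2 a ≤ k2 b)

-- strict lexicographic order on the two keys
def pvLt {α : Type} (k1 k2 : α → Int) (a b : α) : Prop :=
  k1 a < k1 b ∨ (k1 a = k1 b ∧ k2 a < k2 b)

lemma pvInsertBy_pairwise {α : Type} (k1 k2 : α → Int) (x : α) (ys : List α)
    (h : ys.Pairwise (pvLe k1 k2)) :
    (PySem.List.insertBy (pvLtB k1 k2) x ys).Pairwise (pvLe k1 k2) := by
  induction ys with
  | nil => simp [PySem.List.insertBy]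
  | cons y ys ih =>
    rw [List.pairwise_cons] at h
    by_cases hb : pvLtB k1 k2 x y = true
    · rw [PySem.List.insertBy, if_pos hb]
      have hxy : pvLe k1 k2 x y := by
        simp only [pvLtB, Bool.or_eq_true, Bool.and_eq_true, Bool.not_eq_true',
          decide_eq_true_eq, decide_eq_false_iff_not] at hb
        unfold pvLe; omega
      refine List.pairwise_cons.mpr ⟨?_, List.pairwise_cons.mpr ⟨h.1, h.2⟩⟩
      intro z hz
      rcases List.mem_cons.mp hz with rfl | hz
      · exact hxy
      · have := h.1 z hz
        unfold pvLe at *; omega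
    · rw [PySem.List.insertBy, if_neg hb]
      refine List.pairwise_cons.mpr ⟨?_, ih h.2⟩
      intro z hz
      rcases (PySem.List.insertBy_mem_iff _ _ _ _).mp hz with rfl | hz
      · simp only [pvLtB, Bool.or_eq_true, Bool.and_eq_true, Bool.not_eq_true',
          decide_eq_true_eq, decide_eq_false_iff_not] at hb
        unfold pvLe; omega
      · exact h.1 z hz

lemma pvFoldl_insertBy_perm {α : Type} (before : α → α → Bool) :
    ∀ (xs acc : List α), (xs.foldl (fun acc x => PySem.List.insertBy before x acc) acc).Perm (acc ++ xs)
  | [], acc => by simp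
  | x :: xs, acc => by
    simp only [List.foldl_cons]
    refine (pvFoldl_insertBy_perm before xs _).trans ?_
    have h1 : (PySem.List.insertBy before x acc ++ xs).Perm (x :: (acc ++ xs)) :=
      (PySem.List.insertBy_perm before x acc).append_right xs
    exact h1.trans List.perm_middle.symm

-- sorted2 with an injective Int-pair key is the unique strictly increasing rearrangement
lemma pvFoldl_insertBy_pairwise {α : Type} (k1 k2 : α → Int) (xs : List α) :
    (xs.foldl (fun acc x => PySem.List.insertBy (pvLtB k1 k2) x acc) []).Pairwise (pvLe k1 k2) := by
  induction xs using List.reverseRecOn with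
  | nil => simp
  | append_singleton xs x ih =>
    rw [List.foldl_append, List.foldl_cons, List.foldl_nil]
    exact pvInsertBy_pairwise k1 k2 x _ ih

lemma pvSorted2_eq_of_perm {α : Type} (xs ys : List α) (k1 k2 : α → Int)
    (hinj : ∀ a ∈ xs, ∀ b ∈ xs, k1 a = k1 b → k2 a = k2 b → a = b)
    (hperm : ys.Perm xs)
    (hpw : ys.Pairwise (pvLt k1 k2)) :
    PySem.List.sorted2 xs k1 k2 = ys := by
  have hdef : PySem.List.sorted2 xs k1 k2 =
      xs.foldl (fun acc x => PySem.List.insertBy (pvLtB k1 k2) x acc) [] := rfl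
  rw [hdef]
  set res := xs.foldl (fun acc x => PySem.List.insertBy (pvLtB k1 k2) x acc) [] with hres
  have hrperm : res.Perm xs := by
    simpa using pvFoldl_insertBy_perm (pvLtB k1 k2) xs []
  have hrpw : res.Pairwise (pvLe k1 k2) := pvFoldl_insertBy_pairwise k1 k2 xs
  have hypw : ys.Pairwise (pvLe k1 k2) := hpw.imp (by intro a b h; unfold pvLt pvLe at *; omega)
  refine List.Perm.eq_of_pairwise ?_ hrpw hypw (hrperm.trans hperm.symm)
  intro a b ha hb hab hba
  have ha' : a ∈ xs := hrperm.mem_iff.mp ha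
  have hb' : b ∈ xs := hperm.mem_iff.mp hb
  unfold pvLe at hab hba
  exact hinj a ha' b hb' (by omega) (by omega)

-- one step of B: the (at most two) offsets with first coordinate x, in order
def pvStep (n x : Int) : List (List Int) :=
  if n - |x| > 0 then [[x, -(n - |x|)], [x, n - |x|]] else [[x, 0]]

lemma pvAlt_eq_flatMap (n : Int) :
    getMovWay_alt n = (PySem.List.pyRange (-n) (n + 1)).flatMap (pvStep n) := by
  unfold getMovWay_alt
  have : ∀ (l : List Int) (acc : List (List Int)),
      l.foldl (fun acc x => let r := n - |x|;
        if r > 0 then acc ++ [[x, -r]] ++ [[x, r]] else acc ++ [[x, 0]]) acc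
      = acc ++ l.flatMap (pvStep n) := by
    intro l
    induction l with
    | nil => simp
    | cons x l ih =>
      intro acc
      simp only [List.foldl_cons, List.flatMap_cons, ih]
      unfold pvStep
      split_ifs <;> simp
  simpa using this (PySem.List.pyRange (-n) (n + 1)) []

lemma pvStep_key1 (n x : Int) : ∀ e ∈ pvStep n x, PySem.List.pyGetD e 0 0 = x := by
  intro e he
  unfold pvStep at he
  split_ifs at he <;> simp only [List.mem_cons, List.not_mem_nil, or_false] at he <;>
    rcases he with rfl | rfl <;> rfl

lemma pvStep_pairwise (n x : Int) :
    (pvStep n x).Pairwise (pvLt (fun e => PySem.List.pyGetD e 0 0) (fun e => PySem.List.pyGetD e 1 0)) := by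
  unfold pvStep
  split_ifs with h
  · refine List.pairwise_cons.mpr ⟨?_, by simp⟩
    intro z hz
    simp only [List.mem_cons, List.not_mem_nil, or_false] at hz
    subst hz
    right
    refine ⟨rfl, ?_⟩
    show -(n - |x|) < n - |x|
    omega
  · simp

lemma pvFlat_pairwise (n : Int) :
    ∀ (k : Nat) (a : Int),
      ((PySem.List.pyRange a (a + k)).flatMap (pvStep n)).Pairwise
        (pvLt (fun e => PySem.List.pyGetD e 0 0) (fun e => PySem.List.pyGetD e 1 0)) := by
  intro k
  induction k with
  | zero =>
    intro a
    rw [PySem.List.pyRange_one_eq_nil (by omega)]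
    simp
  | succ k ih =>
    intro a
    have hlt : a < a + (k + 1 : Nat) := by omega
    rw [PySem.List.pyRange_one_cons hlt, List.flatMap_cons]
    refine List.pairwise_append.mpr ⟨pvStep_pairwise n a, ?_, ?_⟩
    · have : a + ((k + 1 : Nat) : Int) = (a + 1) + (k : Nat) := by push_cast; ring
      rw [this]
      exact ih (a + 1)
    · intro e1 h1 e2 h2
      rcases List.mem_flatMap.mp h2 with ⟨x, hx, he2⟩
      have hxa : a + 1 ≤ x := (PySem.List.mem_pyRange_one.mp hx).1
      left
      show PySem.List.pyGetD e1 0 0 < PySem.List.pyGetD e2 0 0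
      rw [pvStep_key1 n a e1 h1, pvStep_key1 n x e2 he2]
      omega

lemma pvLt_ne {a b : List Int}
    (h : pvLt (fun e => PySem.List.pyGetD e 0 0) (fun e => PySem.List.pyGetD e 1 0) a b) : a ≠ b := by
  rintro rfl
  unfold pvLt at h
  omega

-- membership in B's list, for 0 ≤ n: exactly the offsets [a, b] with |a| + |b| = n
lemma pvMemB (n : Int) (_hn : 0 ≤ n) (e : List Int) :
    e ∈ getMovWay_alt n ↔ ∃ a b : Int, e = [a, b] ∧ |a| + |b| = n := by
  rw [pvAlt_eq_flatMap, List.mem_flatMap]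
  constructor
  · rintro ⟨x, hx, he⟩
    have hxr := PySem.List.mem_pyRange_one.mp hx
    unfold pvStep at he
    split_ifs at he with h <;> simp only [List.mem_cons, List.not_mem_nil, or_false] at he
    · rcases he with rfl | rfl
      · exact ⟨x, -(n - |x|), rfl, by simp only [Int.abs_eq_natAbs]; omega⟩
      · exact ⟨x, n - |x|, rfl, by simp only [Int.abs_eq_natAbs]; omega⟩
    · subst he
      refine ⟨x, 0, rfl, ?_⟩
      simp only [Int.abs_eq_natAbs] at h ⊢
      omega
  · rintro ⟨a, b, rfl, hab⟩
    simp only [Int.abs_eq_natAbs] at hab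
    refine ⟨a, PySem.List.mem_pyRange_one.mpr (by omega), ?_⟩
    unfold pvStep
    by_cases h : n - |a| > 0
    · rw [if_pos h]
      simp only [Int.abs_eq_natAbs] at h
      rcases abs_cases b with ⟨hb1, _⟩ | ⟨hb1, _⟩
      · have h2 : n - |a| = b := by simp only [Int.abs_eq_natAbs] at hb1 ⊢; omega
        simp [h2]
      · have h2 : -(n - |a|) = b := by simp only [Int.abs_eq_natAbs] at hb1 ⊢; omega
        simp [h2]
    · rw [if_neg h]
      simp only [Int.abs_eq_natAbs] at h
      have : b = 0 := by omega
      simp [this]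

-- membership through A's four-adds-per-iteration foldl over the Set
lemma pvMem_foldl_add4 {α : Type} [BEq α] [LawfulBEq α] {β : Type}
    (f1 f2 f3 f4 : β → α) :
    ∀ (l : List β) (s : PySem.Set α) (y : α),
      (y ∈ l.foldl (fun s i => ((((s.add (f1 i)).add (f2 i)).add (f3 i)).add (f4 i))) s) ↔
        y ∈ s ∨ ∃ i ∈ l, y = f1 i ∨ y = f2 i ∨ y = f3 i ∨ y = f4 i := by
  intro l
  induction l with
  | nil => simp
  | cons x l ih =>
    intro s y
    rw [List.foldl_cons, ih]
    simp only [PySem.Set.mem_add, List.mem_cons]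
    constructor
    · rintro (((((h | h) | h) | h) | h) | ⟨i, hi, h⟩)
      · exact Or.inl h
      · exact Or.inr ⟨x, Or.inl rfl, by tauto⟩
      · exact Or.inr ⟨x, Or.inl rfl, by tauto⟩
      · exact Or.inr ⟨x, Or.inl rfl, by tauto⟩
      · exact Or.inr ⟨x, Or.inl rfl, by tauto⟩
      · exact Or.inr ⟨i, Or.inr hi, h⟩
    · rintro (h | ⟨i, rfl | hi, h⟩)
      · tauto
      · tauto
      · exact Or.inr ⟨i, hi, h⟩

lemma pvNodup_foldl_add4 {α : Type} [BEq α] [LawfulBEq α] {β : Type}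
    (f1 f2 f3 f4 : β → α) :
    ∀ (l : List β) (s : PySem.Set α), s.Nodup →
      (l.foldl (fun s i => ((((s.add (f1 i)).add (f2 i)).add (f3 i)).add (f4 i))) s).Nodup := by
  intro l
  induction l with
  | nil => intro s hs; simpa using hs
  | cons x l ih =>
    intro s hs
    rw [List.foldl_cons]
    exact ih _ (PySem.Set.nodup_add _ _ (PySem.Set.nodup_add _ _ (PySem.Set.nodup_add _ _ (PySem.Set.nodup_add _ _ hs))))

-- the Set built by A's loop
def pvSetA (n : Int) : PySem.Set (List Int) :=
  (PySem.List.pyRange 0 (n + 1)).foldl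
    (fun s i =>
      ((((s.add [i, n - i]).add
          [i, (n - i) * -1]).add
          [i * -1, (n - i) * -1]).add
          [i * -1, n - i]))
    PySem.Set.empty

lemma pvMemA (n : Int) (hn : 0 ≤ n) (e : List Int) :
    e ∈ pvSetA n ↔ ∃ a b : Int, e = [a, b] ∧ |a| + |b| = n := by
  unfold pvSetA
  rw [pvMem_foldl_add4 (fun i => [i, n - i]) (fun i => [i, (n - i) * -1])
    (fun i => [i * -1, (n - i) * -1]) (fun i => [i * -1, n - i])]
  simp only [PySem.Set.empty, List.not_mem_nil, false_or]
  constructor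
  · rintro ⟨i, hi, h⟩
    have hir := PySem.List.mem_pyRange_one.mp hi
    rcases h with rfl | rfl | rfl | rfl
    · exact ⟨i, n - i, rfl, by simp only [Int.abs_eq_natAbs]; omega⟩
    · exact ⟨i, (n - i) * -1, rfl, by simp only [Int.abs_eq_natAbs]; omega⟩
    · exact ⟨i * -1, (n - i) * -1, rfl, by simp only [Int.abs_eq_natAbs]; omega⟩
    · exact ⟨i * -1, n - i, rfl, by simp only [Int.abs_eq_natAbs]; omega⟩
  · rintro ⟨a, b, rfl, hab⟩
    simp only [Int.abs_eq_natAbs] at hab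
    refine ⟨(a.natAbs : Int), PySem.List.mem_pyRange_one.mpr (by omega), ?_⟩
    rcases Int.natAbs_eq a with ha | ha <;> rcases Int.natAbs_eq b with hb | hb
    · left; simp only [List.cons.injEq, and_true]; omega
    · right; left; simp only [List.cons.injEq, and_true]; omega
    · right; right; right; simp only [List.cons.injEq, and_true]; omega
    · right; right; left; simp only [List.cons.injEq, and_true]; omega

lemma pvNodupA (n : Int) : (pvSetA n).Nodup := by
  unfold pvSetA
  exact pvNodup_foldl_add4 _ _ _ _ _ _ (by simp [PySem.Set.empty])

-- ===== VERDICT (by name: the statement is the Claim_ definition above) =====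
theorem getMovWay_spec : Claim_equal_getMovWay := by
  intro second _
  unfold Spec_getMovWay
  by_cases hn : 0 ≤ second
  · show PySem.List.sorted2 (pvSetA second) _ _ = getMovWay_alt second
    apply pvSorted2_eq_of_perm
    · intro a ha b hb h1 h2
      rcases (pvMemA second hn a).mp ha with ⟨a1, a2, rfl, _⟩
      rcases (pvMemA second hn b).mp hb with ⟨b1, b2, rfl, _⟩
      have e1 : a1 = b1 := h1
      have e2 : a2 = b2 := h2
      rw [e1, e2]
    · have hnodB : (getMovWay_alt second).Nodup := by
        have hpw := pvFlat_pairwise second (2 * second + 1).toNat (-second)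
        rw [show (-second) + ((2 * second + 1).toNat : Int) = second + 1 by omega] at hpw
        rw [pvAlt_eq_flatMap]
        exact List.Pairwise.imp (fun h => pvLt_ne h) hpw
      rw [List.perm_ext_iff_of_nodup hnodB (pvNodupA second)]
      intro e
      rw [pvMemB second hn e, pvMemA second hn e]
    · have hpw := pvFlat_pairwise second (2 * second + 1).toNat (-second)
      rw [show (-second) + ((2 * second + 1).toNat : Int) = second + 1 by omega] at hpw
      rw [pvAlt_eq_flatMap]
      exact hpw
  · have h1 : PySem.List.pyRange 0 (second + 1) = [] := PySem.List.pyRange_one_eq_nil (by omega)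
    have h2 : PySem.List.pyRange (-second) (second + 1) = [] := PySem.List.pyRange_one_eq_nil (by omega)
    unfold getMovWay getMovWay_alt
    rw [h1, h2]
    rfl
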